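-- pv_equiv track=rewrite | github.com/GuiMarolly/Tarefa_Avalia-o_RA02 | main.py | conjunto_T
-- ===== SOURCE A (Python) =====
-- def conjunto_T(num):
--     if num == 2:
--         return True
--     elif num < 2:
--         return False
--     elif num % 2 != 0:
--         return conjunto_T(num - 3) or conjunto_T(num // 2)
--     else:
--         return False
-- ===== SOURCE B (Python) =====
-- def conjunto_T(num):
--     # Closed-form: accepted set is {2} and {6*2^k - 1 : k >= 0}
--     # (the num-3 branch, on an even argument, succeeds only at 5).
--     if num == 2:
--         return True
--     m = num + 1
--     if m < 6 or m % 3 != 0: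
--         return False
--     t = m // 3
--     while t % 2 == 0:
--         t //= 2
--     return t == 1
-- ===== Notes on version B (the rewrite author's own statement) =====
-- stated objective: alternative
-- what changed: Replaced the two-branch call-tree recursion by an arithmetic closed-form membership test: the accepted set is {2} and {6*2^k - 1}, so B checks num==2 or that (num+1) is 3 times a power of two (stripping factors of 2 in a small loop), with no recursion on num.
import Mathlib
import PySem

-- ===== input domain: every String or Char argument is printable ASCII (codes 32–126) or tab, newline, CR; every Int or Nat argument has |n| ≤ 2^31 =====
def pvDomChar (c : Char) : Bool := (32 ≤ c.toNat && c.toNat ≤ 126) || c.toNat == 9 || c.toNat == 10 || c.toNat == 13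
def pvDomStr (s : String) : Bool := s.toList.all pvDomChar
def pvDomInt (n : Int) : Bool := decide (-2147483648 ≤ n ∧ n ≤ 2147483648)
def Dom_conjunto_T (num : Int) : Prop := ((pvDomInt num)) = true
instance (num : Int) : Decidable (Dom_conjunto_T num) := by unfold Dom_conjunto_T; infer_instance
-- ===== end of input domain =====

-- B replaces A's two-branch call-tree recursion by a closed-form arithmetic test:
-- the accepted set is {2} and {6*2^k - 1}, i.e. num == 2 or num+1 = 3 * (a power of two >= 2).

-- ===== PORT A =====
def conjunto_T (num : Int) : Bool :=
  if num = 2 then true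
  else if num < 2 then false
  else if PySem.Int.mod num 2 ≠ 0 then
    conjunto_T (num - 3) || conjunto_T (PySem.Int.floordiv num 2)
  else false
termination_by num.toNat
decreasing_by
  · omega
  · rw [PySem.Int.floordiv_eq_ediv_of_pos (by omega)]; omega

-- ===== PORT B =====
-- the while loop of Source B: strip factors of 2 (2 ≤ t is a totality guard only;
-- every call site has t ≥ 2, where it does not change the computation)
def pvHalve (t : Int) : Int :=
  if PySem.Int.mod t 2 = 0 ∧ 2 ≤ t then pvHalve (PySem.Int.floordiv t 2) else t
termination_by t.toNat
decreasing_by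
  rename_i h; rw [PySem.Int.floordiv_eq_ediv_of_pos (by omega)]; omega

def conjunto_T_alt (num : Int) : Bool :=
  if num = 2 then true
  else if num + 1 < 6 ∨ PySem.Int.mod (num + 1) 3 ≠ 0 then false
  else decide (pvHalve (PySem.Int.floordiv (num + 1) 3) = 1)

-- ===== PRECONDITION & SPEC =====
def Spec_conjunto_T (num : Int) (out : Bool) : Prop := out = conjunto_T_alt num
instance (num : Int) (out : Bool) : Decidable (Spec_conjunto_T num out) := by unfold Spec_conjunto_T; infer_instance

-- ===== CLAIM (what is proved, stated in full; the proofs are below) =====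
def Claim_equal_conjunto_T : Prop := ∀ (num : Int), Dom_conjunto_T num → Spec_conjunto_T num (conjunto_T num)

-- ===== LEMMAS AND PROOFS =====

lemma pvHalve_step (t : Int) (h1 : t % 2 = 0) (h2 : 2 ≤ t) :
    pvHalve t = pvHalve (t / 2) := by
  rw [pvHalve]
  rw [PySem.Int.mod_eq_emod_of_pos (by omega : (0:Int) < 2),
      PySem.Int.floordiv_eq_ediv_of_pos (by omega : (0:Int) < 2)]
  simp [h1, h2]

lemma pvHalve_stop (t : Int) (h : t % 2 ≠ 0 ∨ t < 2) : pvHalve t = t := by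
  rw [pvHalve]
  rw [PySem.Int.mod_eq_emod_of_pos (by omega : (0:Int) < 2)]
  rcases h with h | h
  · simp [h]
  · simp [h]

lemma conjunto_T_even (m : Int) (h : m % 2 = 0) :
    conjunto_T m = decide (m = 2) := by
  rw [conjunto_T]
  by_cases h2 : m = 2
  · simp [h2]
  · by_cases hlt : m < 2
    · simp [h2, hlt]
    · have hm : PySem.Int.mod m 2 = 0 := by
        rw [PySem.Int.mod_eq_emod_of_pos (by omega : (0:Int) < 2)]; exact h
      simp [h2, hlt, hm]
      omega

lemma conjunto_T_eq_alt (k : Nat) :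
    ∀ num : Int, num.toNat ≤ k → conjunto_T num = conjunto_T_alt num := by
  induction k with
  | zero =>
    intro num h
    rw [conjunto_T, conjunto_T_alt]
    simp [show num ≠ 2 by omega, show num < 2 by omega, show num + 1 < 6 by omega]
  | succ k ih =>
    intro num h
    by_cases h2 : num = 2
    · rw [conjunto_T, conjunto_T_alt]; simp [h2]
    by_cases hlt : num < 2
    · rw [conjunto_T, conjunto_T_alt]
      simp [h2, hlt, show num + 1 < 6 by omega]
    -- now num > 2
    have hmeq : PySem.Int.mod num 2 = num % 2 :=
      PySem.Int.mod_eq_emod_of_pos (by omega)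
    have hm3 : PySem.Int.mod (num + 1) 3 = (num + 1) % 3 :=
      PySem.Int.mod_eq_emod_of_pos (by omega)
    have hd3 : PySem.Int.floordiv (num + 1) 3 = (num + 1) / 3 :=
      PySem.Int.floordiv_eq_ediv_of_pos (by omega)
    by_cases hodd : num % 2 = 0
    · -- num even > 2 : A is false; B's candidate (num+1)/3 is odd, hence never 1 here
      have hA : conjunto_T num = false := by
        rw [conjunto_T_even num hodd]; simp [h2]
      rw [hA, conjunto_T_alt]
      rw [if_neg h2]
      by_cases hbr : num + 1 < 6 ∨ PySem.Int.mod (num + 1) 3 ≠ 0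
      · rw [if_pos hbr]
      · rw [if_neg hbr]
        rw [hm3] at hbr
        push_neg at hbr
        obtain ⟨hge, hdvd⟩ := hbr
        rw [hd3, pvHalve_stop ((num + 1) / 3) (Or.inl (by omega))]
        rw [eq_comm, decide_eq_false_iff_not]
        omega
    · -- num odd > 2
      by_cases h3 : num = 3
      · subst h3
        have c0 : conjunto_T 0 = false := by rw [conjunto_T]; norm_num
        have c1 : conjunto_T 1 = false := by rw [conjunto_T]; norm_num
        rw [conjunto_T, conjunto_T_alt]
        norm_num [PySem.Int.mod, PySem.Int.floordiv, c0, c1]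
        rw [show Int.fdiv 3 2 = 1 by decide]
        exact fun _ => c1
      by_cases h5 : num = 5
      · subst h5
        have c2t : conjunto_T 2 = true := by rw [conjunto_T]; norm_num
        have hp : pvHalve 2 = 1 := by
          rw [pvHalve_step 2 (by norm_num) (by norm_num)]
          norm_num [pvHalve_stop 1 (Or.inr (by norm_num))]
        rw [conjunto_T, conjunto_T_alt]
        norm_num [PySem.Int.mod, PySem.Int.floordiv, c2t, hp]
        simp [show Int.fmod 5 2 = 1 by decide, show Int.fmod 6 3 = 0 by decide,
              show Int.fdiv 6 3 = 2 by decide, hp]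
      -- num odd ≥ 7
      have h7 : 7 ≤ num := by omega
      have hdiv : PySem.Int.floordiv num 2 = num / 2 :=
        PySem.Int.floordiv_eq_ediv_of_pos (by omega)
      have hstep : conjunto_T num = conjunto_T (num / 2) := by
        rw [conjunto_T]
        rw [if_neg h2, if_neg hlt, hmeq, if_pos (by omega : num % 2 ≠ 0), hdiv]
        rw [conjunto_T_even (num - 3) (by omega)]
        simp [show num - 3 ≠ 2 by omega]
      have hrec : conjunto_T (num / 2) = conjunto_T_alt (num / 2) := by
        apply ih; omega
      rw [hstep, hrec]
      -- show conjunto_T_alt (num / 2) = conjunto_T_alt num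
      have hm'3 : PySem.Int.mod (num / 2 + 1) 3 = (num / 2 + 1) % 3 :=
        PySem.Int.mod_eq_emod_of_pos (by omega)
      have hd'3 : PySem.Int.floordiv (num / 2 + 1) 3 = (num / 2 + 1) / 3 :=
        PySem.Int.floordiv_eq_ediv_of_pos (by omega)
      rw [conjunto_T_alt, conjunto_T_alt]
      rw [if_neg (show ¬ num / 2 = 2 by omega), if_neg h2, hm3, hm'3, hd3, hd'3]
      by_cases hdvd : (num + 1) % 3 = 0
      · have hdvd' : (num / 2 + 1) % 3 = 0 := by omega
        rw [if_neg (by push_neg; exact ⟨by omega, hdvd'⟩),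
            if_neg (by push_neg; exact ⟨by omega, hdvd⟩)]
        have hhalf : (num + 1) / 3 / 2 = (num / 2 + 1) / 3 := by omega
        rw [pvHalve_step ((num + 1) / 3) (by omega) (by omega), hhalf]
      · have hdvd' : (num / 2 + 1) % 3 ≠ 0 := by omega
        rw [if_pos (Or.inr hdvd'), if_pos (Or.inr hdvd)]

-- ===== VERDICT (by name: the statement is the Claim_ definition above) =====
theorem conjunto_T_spec : Claim_equal_conjunto_T := by
  intro num _
  unfold Spec_conjunto_T
  exact conjunto_T_eq_alt num.toNat num le_rfl
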